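-- pv_equiv track=rewrite | github.com/qhoa256/PYTHON-CODEPTIT | BIEN VA KIEU DU LIEU DON GIAN/PY01039_KIEM_TRA_SO_DEP.py | check
-- ===== SOURCE A (Python) =====
-- def check(s):
--     for i in range(2, len(s), 2):
--         if s[i] != s[0]:
--             return False
--     for i in range(3, len(s), 2):
--         if s[i] != s[1]:
--             return False
--     return True
-- ===== SOURCE B (Python) =====
-- def check(s):
--     expected = (s[:2] * (len(s) // 2 + 1))[:len(s)]
--     return s == expected
-- ===== Notes on version B (the rewrite author's own statement) =====
-- stated objective: simpler
-- what changed: Replaces the two strided index-checking loops with building the canonical period-2 string from the first two characters and a single equality comparison.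
import Mathlib
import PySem

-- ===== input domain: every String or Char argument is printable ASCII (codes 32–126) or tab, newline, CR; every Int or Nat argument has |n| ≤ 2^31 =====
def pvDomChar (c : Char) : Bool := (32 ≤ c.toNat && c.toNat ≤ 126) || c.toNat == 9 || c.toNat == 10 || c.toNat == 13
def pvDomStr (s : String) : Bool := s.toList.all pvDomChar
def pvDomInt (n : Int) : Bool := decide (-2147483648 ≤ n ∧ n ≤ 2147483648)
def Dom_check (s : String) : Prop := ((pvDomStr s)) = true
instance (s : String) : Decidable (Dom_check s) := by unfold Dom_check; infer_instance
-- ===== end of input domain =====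

-- B builds the canonical period-2 string from s[:2] and compares once, instead of A's two strided loops (objective: simpler).

-- ===== PORT A =====
-- A's two early-return for-loops over range(2,len,2) / range(3,len,2) become List.all over the same ranges.
def check (s : String) : Bool :=
  let l := s.toList
  ((PySem.List.pyRange 2 (l.length : Int) 2).all
      (fun i => PySem.List.pyGetD l i ' ' == PySem.List.pyGetD l 0 ' '))
  &&
  ((PySem.List.pyRange 3 (l.length : Int) 2).all
      (fun i => PySem.List.pyGetD l i ' ' == PySem.List.pyGetD l 1 ' '))

-- ===== PORT B =====
-- expected = (s[:2] * (len(s)//2 + 1))[:len(s)];  return s == expected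
def check_alt (s : String) : Bool :=
  let l := s.toList
  let pre := PySem.List.slice l none (some 2)
  let expected := PySem.List.slice
      ((List.replicate (PySem.Int.floordiv (l.length : Int) 2 + 1).toNat pre).flatten)
      none (some (l.length : Int))
  l == expected

-- ===== PRECONDITION & SPEC =====
def Spec_check (s : String) (out : Bool) : Prop := out = check_alt s
instance (s : String) (out : Bool) : Decidable (Spec_check s out) := by unfold Spec_check; infer_instance

-- ===== CLAIM (what is proved, stated in full; the proofs are below) =====
def Claim_equal_check : Prop := ∀ (s : String), Dom_check s → Spec_check s (check s)

-- ===== LEMMAS AND PROOFS =====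

-- the shared characterisation: every character equals the character at its index mod 2
def altP (l : List Char) : Prop := ∀ i : Nat, i < l.length → l.getD i ' ' = l.getD (i % 2) ' '

theorem pyGetD_toNat (l : List Char) (x : Int) (hx : 0 ≤ x) (h : x < (l.length : Int)) :
    PySem.List.pyGetD l x ' ' = l.getD x.toNat ' ' := by
  rw [PySem.List.pyGetD_eq_getElem l ' ' hx h, List.getD_eq_getElem l ' ' (by omega)]

theorem check_iff_altP (s : String) : check s = true ↔ altP s.toList := by
  obtain ⟨l, hl⟩ : ∃ l, s.toList = l := ⟨_, rfl⟩
  simp only [check, hl, Bool.and_eq_true, List.all_eq_true, beq_iff_eq]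
  constructor
  · rintro ⟨h1, h2⟩ i hi
    rcases Nat.even_or_odd i with he | ho
    · rcases Nat.lt_or_ge i 2 with h2' | h2'
      · interval_cases i
        · simp
        · exact absurd he (by decide)
      · have hmem : (i : Int) ∈ PySem.List.pyRange 2 (l.length : Int) 2 := by
          rw [PySem.List.mem_pyRange_iff_of_pos (by norm_num)]
          refine ⟨by exact_mod_cast h2', by exact_mod_cast hi, ?_⟩
          obtain ⟨k, hk⟩ := he; omega
        have := h1 _ hmem
        rw [pyGetD_toNat l i (by positivity) (by exact_mod_cast hi),
            pyGetD_toNat l 0 (by norm_num) (by exact_mod_cast Nat.zero_lt_of_lt hi)] at this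
        have h0 : i % 2 = 0 := Nat.even_iff.mp he
        simpa [h0] using this
    · rcases Nat.lt_or_ge i 3 with h3' | h3'
      · have : i = 1 := by obtain ⟨k, hk⟩ := ho; omega
        simp [this]
      · have hmem : (i : Int) ∈ PySem.List.pyRange 3 (l.length : Int) 2 := by
          rw [PySem.List.mem_pyRange_iff_of_pos (by norm_num)]
          refine ⟨by exact_mod_cast h3', by exact_mod_cast hi, ?_⟩
          obtain ⟨k, hk⟩ := ho; omega
        have := h2 _ hmem
        rw [pyGetD_toNat l i (by positivity) (by exact_mod_cast hi),
            pyGetD_toNat l 1 (by norm_num) (by exact_mod_cast (show 1 < l.length by omega))] at this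
        have h1' : i % 2 = 1 := Nat.odd_iff.mp ho
        simpa [h1'] using this
  · intro h
    constructor
    · intro x hx
      rw [PySem.List.mem_pyRange_iff_of_pos (by norm_num)] at hx
      obtain ⟨ha, hb, hd⟩ := hx
      have h0x : (0:Int) ≤ x := by omega
      have hx2 : x.toNat % 2 = 0 := by omega
      have := h x.toNat (by omega)
      rw [pyGetD_toNat l x h0x hb, pyGetD_toNat l 0 (by norm_num) (by omega)]
      simpa [hx2] using this
    · intro x hx
      rw [PySem.List.mem_pyRange_iff_of_pos (by norm_num)] at hx
      obtain ⟨ha, hb, hd⟩ := hx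
      have h0x : (0:Int) ≤ x := by omega
      have hx2 : x.toNat % 2 = 1 := by omega
      have := h x.toNat (by omega)
      rw [pyGetD_toNat l x h0x hb, pyGetD_toNat l 1 (by norm_num) (by omega)]
      simpa [hx2] using this

-- getD of the flattening of k copies of a length-2 list
theorem flat_getD (pre : List Char) (hp : pre.length = 2) :
    ∀ (k i : Nat), i < 2 * k →
      ((List.replicate k pre).flatten).getD i ' ' = pre.getD (i % 2) ' ' := by
  intro k
  induction k with
  | zero => intro i hi; omega
  | succ m ih =>
    intro i hi
    rw [List.replicate_succ, List.flatten_cons]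
    rcases Nat.lt_or_ge i 2 with h2 | h2
    · rw [List.getD_append pre _ ' ' i (by omega)]
      have : i % 2 = i := Nat.mod_eq_of_lt h2
      rw [this]
    · rw [List.getD_append_right pre _ ' ' i (by omega), hp]
      have : (i - 2) % 2 = i % 2 := by omega
      rw [← this]
      exact ih (i - 2) (by omega)

theorem check_alt_iff_altP (s : String) : check_alt s = true ↔ altP s.toList := by
  obtain ⟨l, hl⟩ : ∃ l, s.toList = l := ⟨_, rfl⟩
  set n := l.length with hn
  have hslice2 : PySem.List.slice l none (some 2) = l.take 2 := by
    rw [PySem.List.slice_to] <;> simp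
  have hslicen : ∀ (xs : List Char), PySem.List.slice xs none (some (n : Int)) = xs.take n := by
    intro xs; rw [PySem.List.slice_to] <;> simp
  have hfd : (PySem.Int.floordiv (n : Int) 2 + 1).toNat = n / 2 + 1 := by
    simp [PySem.Int.floordiv, Int.fdiv_eq_ediv]; omega
  simp only [check_alt, hl, beq_iff_eq, ← hn, hslice2, hslicen, hfd]
  rcases Nat.lt_or_ge n 2 with hsmall | hbig
  · -- len(s) < 2: expected = s, both sides hold trivially
    have htake : l.take 2 = l := List.take_of_length_le (by omega)
    have hflat : (List.replicate (n / 2 + 1) (l.take 2)).flatten = l := by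
      have : n / 2 + 1 = 1 := by omega
      rw [this, htake]; simp
    rw [hflat, List.take_of_length_le (by omega)]
    constructor
    · intro _ i hi
      have : i = 0 := by omega
      simp [this]
    · intro _; rfl
  · have hp : (l.take 2).length = 2 := by simp; omega
    have hflen : ((List.replicate (n / 2 + 1) (l.take 2)).flatten).length = 2 * (n / 2 + 1) := by
      simp [hp]; ring
    have hexlen : (((List.replicate (n / 2 + 1) (l.take 2)).flatten).take n).length = n := by
      rw [List.length_take, hflen]; omega
    constructor
    · intro heq i hi
      have := congrArg (fun xs => List.getD xs i ' ') heq
      simp only at this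
      rw [List.getD_eq_getElem _ _ (by omega : i < l.length),
          List.getD_eq_getElem _ _ (by rw [hexlen]; omega)] at this
      rw [List.getElem_take] at this
      have hflat := flat_getD (l.take 2) hp (n / 2 + 1) i (by omega)
      rw [List.getD_eq_getElem _ _ (by rw [hflen]; omega)] at hflat
      have hmodlt : i % 2 < 2 := Nat.mod_lt _ (by norm_num)
      rw [List.getD_eq_getElem _ _ (by rw [hp]; omega)] at hflat
      rw [List.getElem_take] at hflat
      rw [List.getD_eq_getElem _ _ hi, List.getD_eq_getElem _ _ (by omega)]
      rw [this, hflat]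
    · intro h
      apply List.ext_getElem (by omega)
      intro i h1 h2
      have hflat := flat_getD (l.take 2) hp (n / 2 + 1) i (by omega)
      rw [List.getD_eq_getElem _ _ (by rw [hflen]; omega)] at hflat
      rw [List.getD_eq_getElem _ _ (by rw [hp]; exact Nat.mod_lt _ (by norm_num))] at hflat
      rw [List.getElem_take] at hflat
      have hP := h i (by omega)
      rw [List.getD_eq_getElem _ _ (by omega), List.getD_eq_getElem _ _ (by omega)] at hP
      rw [List.getElem_take, hflat, ← hP]

-- ===== VERDICT (by name: the statement is the Claim_ definition above) =====
theorem check_spec : Claim_equal_check := by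
  intro s _
  unfold Spec_check
  have h1 := check_iff_altP s
  have h2 := check_alt_iff_altP s
  cases hA : check s <;> cases hB : check_alt s <;> simp_all
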